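-- pv_equiv track=rewrite | github.com/tomkins/spellcraftcalc | ScWindow.py | plainXMLTag
-- ===== SOURCE A (Python) =====
-- def plainXMLTag(strval):
--     i = 0
--     while i < len(strval):
--         if not (strval[i].isalpha() or (i > 0 and strval[i].isdigit())):
--             strval = strval[:i] + strval[i+1:]
--         else:
--             i += 1
--     return strval
-- ===== SOURCE B (Python) =====
-- def plainXMLTag(strval):
--     kept = [c for c in strval if c.isalpha() or c.isdigit()]
--     start = 0
--     while start < len(kept) and kept[start].isdigit():
--         start += 1
--     return ''.join(kept[start:])
-- ===== Notes on version B (the rewrite author's own statement) =====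
-- stated objective: faster
-- what changed: A repeatedly splices the string in place inside one index-walking loop (quadratic rebuilds); B builds the filtered list of alphanumerics in one pass, then trims the leading digit run and joins once.
import Mathlib
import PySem

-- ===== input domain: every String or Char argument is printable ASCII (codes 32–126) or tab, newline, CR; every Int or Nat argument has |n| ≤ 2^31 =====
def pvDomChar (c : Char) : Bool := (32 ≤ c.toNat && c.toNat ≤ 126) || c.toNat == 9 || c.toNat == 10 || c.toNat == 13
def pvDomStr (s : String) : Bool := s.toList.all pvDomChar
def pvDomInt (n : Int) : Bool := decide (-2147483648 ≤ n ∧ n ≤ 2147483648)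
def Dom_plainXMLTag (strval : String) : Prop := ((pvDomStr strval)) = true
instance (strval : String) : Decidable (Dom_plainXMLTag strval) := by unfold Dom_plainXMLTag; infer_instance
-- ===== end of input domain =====

-- B replaces A's in-place splice loop by one filter pass plus a leading-digit trim.

-- ===== PORT A =====
-- A's while loop: delete strval[i] unless it is alpha, or a digit at i > 0.
def plainALoop (s : List Char) (i : Nat) : List Char :=
  if h : i < s.length then
    if ¬ (PySem.Chars.isalpha s[i] || (decide (i > 0) && PySem.Chars.isdigit s[i])) then
      plainALoop (s.take i ++ s.drop (i + 1)) i
    else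
      plainALoop s (i + 1)
  else s
termination_by s.length - i
decreasing_by
  · simp [List.length_append, List.length_take, List.length_drop]; omega
  · omega

def plainXMLTag (strval : String) : String :=
  String.mk (plainALoop strval.toList 0)

-- ===== PORT B =====
def keepChar (c : Char) : Bool := PySem.Chars.isalpha c || PySem.Chars.isdigit c

-- B's while loop advancing past the leading digits of `kept`.
def trimStart (kept : List Char) (start : Nat) : Nat :=
  if h : start < kept.length then
    if hd : PySem.Chars.isdigit kept[start] then trimStart kept (start + 1) else start
  else start
termination_by kept.length - start

def plainXMLTag_alt (strval : String) : String :=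
  let kept := strval.toList.filter keepChar
  String.mk (kept.drop (trimStart kept 0))

-- ===== PRECONDITION & SPEC =====
def Spec_plainXMLTag (strval : String) (out : String) : Prop := out = plainXMLTag_alt strval
instance (strval : String) (out : String) : Decidable (Spec_plainXMLTag strval out) := by unfold Spec_plainXMLTag; infer_instance

-- ===== CLAIM (what is proved, stated in full; the proofs are below) =====
def Claim_equal_plainXMLTag : Prop := ∀ (strval : String), Dom_plainXMLTag strval → Spec_plainXMLTag strval (plainXMLTag strval)

-- ===== LEMMAS AND PROOFS =====

theorem alpha_not_digit (c : Char) (h : PySem.Chars.isalpha c = true) :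
    PySem.Chars.isdigit c = false := by
  simp [PySem.Chars.isalpha, PySem.Chars.isupper, PySem.Chars.islower, Char.le_def,
    UInt32.le_iff_toNat_le] at h
  simp [PySem.Chars.isdigit, Char.le_def, UInt32.le_iff_toNat_le]
  intro h0
  rcases h with h | h <;> omega

-- once i ≥ 1, A's loop keeps exactly the alphanumeric characters of the suffix
theorem plainALoop_pos (s : List Char) (i : Nat) (hi : 1 ≤ i) :
    plainALoop s i = s.take i ++ (s.drop i).filter keepChar := by
  fun_induction plainALoop s i with
  | case1 s i h hcond ih =>
    rw [ih hi]
    have hdrop : s.drop i = s[i] :: s.drop (i + 1) := List.drop_eq_getElem_cons h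
    have hkeep : keepChar s[i] = false := by
      simp only [keepChar]
      simp only [decide_eq_true (by omega : i > 0), Bool.true_and] at hcond
      simpa using hcond
    have h1 : (s.take i ++ s.drop (i + 1)).take i = s.take i := by
      rw [List.take_append_of_le_length (by simp; omega), List.take_take, Nat.min_self]
    have h2 : (s.take i ++ s.drop (i + 1)).drop i = s.drop (i + 1) := by
      rw [List.drop_append_of_le_length (by simp; omega)]
      simp
    rw [h1, h2, hdrop, List.filter_cons, if_neg (by simp [hkeep])]
  | case2 s i h hcond ih =>
    rw [ih (by omega)]
    have hdrop : s.drop i = s[i] :: s.drop (i + 1) := List.drop_eq_getElem_cons h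
    have hkeep : keepChar s[i] = true := by
      simp only [not_not, decide_eq_true (by omega : i > 0), Bool.true_and] at hcond
      simpa [keepChar] using hcond
    rw [List.take_add_one, hdrop, List.getElem?_eq_getElem h, List.filter_cons, if_pos hkeep]
    simp only [Option.toList_some, List.append_assoc, List.singleton_append]
  | case3 s i h =>
    have : s.length ≤ i := by omega
    simp [List.take_of_length_le this, List.drop_of_length_le this]

-- at i = 0, A's loop computes B's value: filter then drop the leading digits
theorem plainALoop_zero (s : List Char) :
    plainALoop s 0 = (s.filter keepChar).dropWhile PySem.Chars.isdigit := by
  induction s with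
  | nil => simp [plainALoop]
  | cons c t ih =>
    rw [plainALoop]
    simp only [List.length_cons, Nat.zero_lt_succ, dif_pos, List.getElem_cons_zero,
      gt_iff_lt, Nat.lt_irrefl, decide_false, Bool.false_and, Bool.or_false,
      List.take_zero, List.drop_succ_cons, List.drop_zero, List.nil_append]
    by_cases ha : PySem.Chars.isalpha c = true
    · rw [if_neg (by simp [ha])]
      rw [plainALoop_pos (c :: t) 1 (le_refl 1)]
      simp [keepChar, ha, alpha_not_digit c ha]
    · rw [if_pos (by simpa using ha), ih]
      simp only [Bool.not_eq_true] at ha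
      by_cases hd : PySem.Chars.isdigit c = true
      · simp [keepChar, ha, hd]
      · simp only [Bool.not_eq_true] at hd
        simp [keepChar, ha, hd]

-- B's index loop computes dropWhile isdigit
theorem trimStart_drop (kept : List Char) (start : Nat) :
    kept.drop (trimStart kept start) = (kept.drop start).dropWhile PySem.Chars.isdigit := by
  fun_induction trimStart kept start with
  | case1 start h hd ih =>
    rw [ih, List.drop_eq_getElem_cons h, List.dropWhile_cons, if_pos hd]
  | case2 start h hd =>
    rw [List.drop_eq_getElem_cons h, List.dropWhile_cons, if_neg hd]
  | case3 start h =>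
    have hle : kept.length ≤ start := by omega
    simp [List.drop_of_length_le hle]

-- ===== VERDICT (by name: the statement is the Claim_ definition above) =====
theorem plainXMLTag_spec : Claim_equal_plainXMLTag := by
  intro strval _
  show plainXMLTag strval = plainXMLTag_alt strval
  show String.mk (plainALoop strval.toList 0) =
    String.mk ((strval.toList.filter keepChar).drop
      (trimStart (strval.toList.filter keepChar) 0))
  rw [plainALoop_zero, trimStart_drop]
  simp
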